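-- pv_equiv track=rewrite | github.com/MaelBrocher/AdventOfCode2021 | Day14/code_day_14.py | polymerization
-- ===== SOURCE A (Python) =====
-- from collections import Counter
--
-- def polymerization(start, instructions, length):
--     pairs = Counter(map(str.__add__, start, start[1:]))
--     chars = Counter(start)
--
--     for bite in range(length):
--         for (a,b), c in pairs.copy().items():
--             x = instructions[a+b]
--             pairs[a+b] -= c
--             pairs[a+x] += c
--             pairs[x+b] += c
--             chars[x] += c
--     return max(chars.values())-min(chars.values())
-- ===== SOURCE B (Python) =====
-- from collections import Counter
--
-- def polymerization(start, instructions, length):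
--     s = start
--     for _ in range(length):
--         s = "".join(a + instructions[a + b] for a, b in zip(s, s[1:])) + s[-1:]
--     counts = Counter(s)
--     return max(counts.values()) - min(counts.values())
-- ===== Notes on version B (the rewrite author's own statement) =====
-- stated objective: alternative
-- what changed: B replaces A's Counter-of-pairs bookkeeping (a dict of pair counts updated in place each step) by the naive simulation: it rebuilds the polymer string itself each step by scanning adjacent pairs left to right and inserting the looked-up character, then counts characters once at the end; note B is exponential in `length` while A is polynomial, so B is the simpler but slower formulation.
-- outside the precondition, e.g. on polymerization('AB', {'AB': 'AA'}, 1): A returns 0, B returns 2; on polymerization('AB', {'AB': 'C', 'AC': 'B', 'CB': 'A'}, 1): A returns 0, B returns 0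
import Mathlib
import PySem

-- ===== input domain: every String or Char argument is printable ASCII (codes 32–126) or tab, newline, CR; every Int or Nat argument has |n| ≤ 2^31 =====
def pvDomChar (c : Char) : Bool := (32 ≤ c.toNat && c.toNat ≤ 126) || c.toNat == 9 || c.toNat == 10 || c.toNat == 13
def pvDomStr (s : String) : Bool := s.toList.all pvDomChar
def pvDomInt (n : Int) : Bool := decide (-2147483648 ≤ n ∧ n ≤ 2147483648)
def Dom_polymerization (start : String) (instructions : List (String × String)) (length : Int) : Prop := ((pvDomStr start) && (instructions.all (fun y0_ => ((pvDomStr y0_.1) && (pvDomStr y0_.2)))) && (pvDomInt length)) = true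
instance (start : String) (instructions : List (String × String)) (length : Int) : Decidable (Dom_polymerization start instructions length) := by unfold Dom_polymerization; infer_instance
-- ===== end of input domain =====

-- B replaces A's pair-counter bookkeeping with a naive left-to-right rebuild of the polymer
-- string each step, counting characters once at the end (objective: alternative; B is
-- exponential in `length` where A is not — no speed claim).

-- ===== PORT A =====
-- shared helper: `instructions[k]` — Python dict lookup (KeyError = none, excluded by Pre_;
-- the "" default is never reached on inputs admitted by Pre_)
def pvLookup (instructions : List (String × String)) (k : String) : String :=
  ((PySem.Dict.ofList instructions).get? k).getD ""

-- one iteration of A's inner loop body: `(a,b), c = e`; unpacking a key that is not exactly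
-- two chars raises in Python (excluded by Pre_) — the fallback branch is never reached there
def pvStepA (instructions : List (String × String))
    (st : PySem.Dict String Int × PySem.Dict String Int) (e : String × Int) :
    PySem.Dict String Int × PySem.Dict String Int :=
  match e.1.toList with
  | [a, b] =>
      let x := pvLookup instructions (String.ofList [a, b])
      let P := st.1.modify (String.ofList [a, b]) 0 (· - e.2)
      let P := P.modify (String.ofList (a :: x.toList)) 0 (· + e.2)
      let P := P.modify (String.ofList (x.toList ++ [b])) 0 (· + e.2)
      (P, st.2.modify x 0 (· + e.2))
  | _ => st

def polymerization (start : String) (instructions : List (String × String)) (length : Int) : Int :=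
  let pairs0 := PySem.Dict.counter
    ((start.toList.zip start.toList.tail).map (fun p => String.ofList [p.1, p.2]))
  let chars0 := PySem.Dict.counter (start.toList.map (fun c => String.ofList [c]))
  let st := (PySem.List.pyRange 0 length 1).foldl
    (fun st _ => st.1.items.foldl (pvStepA instructions) st) (pairs0, chars0)
  (PySem.List.max? st.2.values (fun v => v)).getD 0
    - (PySem.List.min? st.2.values (fun v => v)).getD 0
  -- `.getD 0` is unreachable: Pre_ excludes the empty start, the only input where
  -- Python's max()/min() raise

-- ===== PORT B =====
-- one pass of B's rebuild: `"".join(a + instructions[a+b] for a, b in zip(s, s[1:])) + s[-1:]`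
-- (the string is kept as List Char, PySem style)
def pvExpandB (instructions : List (String × String)) (s : List Char) : List Char :=
  (s.zip s.tail).flatMap
    (fun p => p.1 :: (pvLookup instructions (String.ofList [p.1, p.2])).toList)
    ++ PySem.List.slice s (some (-1)) none

def polymerization_alt (start : String) (instructions : List (String × String)) (length : Int) : Int :=
  let s := (PySem.List.pyRange 0 length 1).foldl
    (fun s _ => pvExpandB instructions s) start.toList
  let counts := PySem.Dict.counter s
  (PySem.List.max? counts.values (fun v => v)).getD 0
    - (PySem.List.min? counts.values (fun v => v)).getD 0

-- ===== PRECONDITION & SPEC =====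
-- the alphabet every produced character can come from: chars of `start` and of all rule outputs
def pvAlpha (start : String) (instructions : List (String × String)) : List Char :=
  PySem.Set.ofList (start.toList ++ instructions.flatMap (fun p => p.2.toList))

-- Pre_ excludes (i) the empty start (Python's max() raises ValueError) and (ii), when the loop
-- really runs (length > 0 and at least one pair), instruction tables that are not a total
-- single-char rule set over the reachable alphabet: outside that A can raise KeyError, unpack
-- multi-char keys (ValueError), or count a multi-char insertion as one Counter key — a
-- completeness over-approximation, so some inputs on which A happens to return (unreached
-- missing pairs / unused multi-char rules) are excluded too; see claim.json "cites".
def Pre_polymerization (start : String) (instructions : List (String × String)) (length : Int) : Prop :=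
  start ≠ "" ∧
    (length ≤ 0 ∨ start.toList.length = 1 ∨
      ∀ a ∈ pvAlpha start instructions, ∀ b ∈ pvAlpha start instructions,
        (((PySem.Dict.ofList instructions).get? (String.ofList [a, b])).map
          (fun v => v.toList.length)) = some 1)

instance (start : String) (instructions : List (String × String)) (length : Int) : Decidable (Pre_polymerization start instructions length) := by unfold Pre_polymerization; infer_instance

def pvWitness_polymerization : String × (List (String × String)) × Int :=
  ("AB", [("AB","C")], 0)

def Spec_polymerization (start : String) (instructions : List (String × String)) (length : Int) (out : Int) : Prop := out = polymerization_alt start instructions length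
instance (start : String) (instructions : List (String × String)) (length : Int) (out : Int) : Decidable (Spec_polymerization start instructions length out) := by unfold Spec_polymerization; infer_instance

-- ===== CLAIM (what is proved, stated in full; the proofs are below) =====
def Claim_equal_polymerization : Prop := ∀ (start : String) (instructions : List (String × String)) (length : Int), Dom_polymerization start instructions length → Pre_polymerization start instructions length → Spec_polymerization start instructions length (polymerization start instructions length)

-- ===== LEMMAS AND PROOFS =====

-- abbreviations used only by the proofs
def pvSg (c : Char) : String := String.ofList [c]
def pvKeyStr (p : Char × Char) : String := String.ofList [p.1, p.2]
def pvMpairs (s : List Char) : List String := (s.zip s.tail).map pvKeyStr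

-- the inserted character of a rule (meaningful under pvGood)
def pvFc (instructions : List (String × String)) (p : Char × Char) : Char :=
  ((pvLookup instructions (pvKeyStr p)).toList).headD 'a'

-- the two successor pair keys of a pair key
def pvChA (instructions : List (String × String)) (k : String) : String :=
  match k.toList with
  | [a, _] => String.ofList (a :: (pvLookup instructions k).toList)
  | _ => k
def pvChB (instructions : List (String × String)) (k : String) : String :=
  match k.toList with
  | [_, b] => String.ofList ((pvLookup instructions k).toList ++ [b])
  | _ => k

-- the instruction table is a total single-char rule set over the alphabet A
def pvGood (instructions : List (String × String)) (A : List Char) : Prop :=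
  ∀ a ∈ A, ∀ b ∈ A, ∃ c, c ∈ A ∧
    (PySem.Dict.ofList instructions).get? (String.ofList [a, b]) = some (String.ofList [c])

-- the P- and C- components of pvStepA
def pvStepP (instructions : List (String × String))
    (P : PySem.Dict String Int) (e : String × Int) : PySem.Dict String Int :=
  match e.1.toList with
  | [a, b] =>
      let x := pvLookup instructions (String.ofList [a, b])
      (((P.modify (String.ofList [a, b]) 0 (· - e.2)).modify
          (String.ofList (a :: x.toList)) 0 (· + e.2)).modify
          (String.ofList (x.toList ++ [b])) 0 (· + e.2))
  | _ => P
def pvStepC (instructions : List (String × String))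
    (C : PySem.Dict String Int) (e : String × Int) : PySem.Dict String Int :=
  match e.1.toList with
  | [a, b] => C.modify (pvLookup instructions (String.ofList [a, b])) 0 (· + e.2)
  | _ => C

-- recursive form of one rebuild pass
def pvExpandR (instructions : List (String × String)) : List Char → List Char
  | [] => []
  | [a] => [a]
  | a :: b :: t =>
      a :: ((pvLookup instructions (String.ofList [a, b])).toList
        ++ pvExpandR instructions (b :: t))

-- the invariant tying A's two counters to B's polymer string
structure pvInv (instructions : List (String × String)) (A : List Char)
    (s : List Char) (P C : PySem.Dict String Int) : Prop where
  hs : ∀ x ∈ s, x ∈ A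
  hPn : P.keys.Nodup
  hCn : C.keys.Nodup
  hPsh : ∀ k ∈ P.keys, ∃ a b, a ∈ A ∧ b ∈ A ∧ k = String.ofList [a, b]
  hCsh : ∀ k ∈ C.keys, ∃ c, c ∈ s ∧ k = String.ofList [c]
  hCmem : ∀ c ∈ s, String.ofList [c] ∈ C.keys
  hP : ∀ q, P.getD q 0 = ((pvMpairs s).count q : Int)
  hC : ∀ y, C.getD y 0 = ((s.map pvSg).count y : Int)
  hW : ∀ k ∈ P.keys, 0 < (pvMpairs s).count k ∨
        (pvLookup instructions k ∈ C.keys ∧ pvChA instructions k ∈ P.keys ∧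
          pvChB instructions k ∈ P.keys)

theorem pvSliceLast (s : List Char) : PySem.List.slice s (some (-1)) none = s.drop (s.length - 1) := by
  rcases s with _ | ⟨a, t⟩
  · rfl
  · show List.take _ (List.drop _ _) = _
    simp only []
    have h1 : PySem.List.clampIdx (a :: t).length (-1) = (a :: t).length - 1 := by
      simp [PySem.List.clampIdx]
    rw [h1]
    have h2 : (a :: t).length - ((a :: t).length - 1) = 1 := by
      simp only [List.length_cons]; omega
    rw [h2]
    apply List.take_of_length_le
    simp

theorem pvExpandB_eq_expandR (instructions : List (String × String)) (s : List Char) :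
    pvExpandB instructions s = pvExpandR instructions s := by
  match s with
  | [] => rfl
  | [a] => rfl
  | a :: b :: t =>
    have ih := pvExpandB_eq_expandR instructions (b :: t)
    unfold pvExpandB at ih ⊢
    rw [pvSliceLast] at ih ⊢
    simp only [List.tail_cons, List.zip_cons_cons, List.flatMap_cons] at ih ⊢
    rw [pvExpandR]
    rw [← ih]
    simp

theorem pvExpandR_ne_nil (instructions : List (String × String)) (s : List Char)
    (h : s ≠ []) : pvExpandR instructions s ≠ [] := by
  match s with
  | [a] => simp [pvExpandR]
  | a :: b :: t => simp [pvExpandR]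

-- one Counter `+=`/`-=` loop at dict level: getD after the fold, key membership, nodup
theorem pvGetD_foldl_stepC (instructions : List (String × String)) (L : List (String × Int))
    (C : PySem.Dict String Int) (hsh : ∀ e ∈ L, ∃ a b, e.1 = String.ofList [a, b]) (x : String) :
    (L.foldl (pvStepC instructions) C).getD x 0 =
      C.getD x 0 + (L.map (fun e => if pvLookup instructions e.1 = x then e.2 else 0)).sum := by
  induction L generalizing C with
  | nil => simp
  | cons e L ih =>
    obtain ⟨a, b, hab⟩ := hsh e (List.mem_cons_self ..)
    obtain ⟨k, c⟩ := e
    simp only at hab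
    subst hab
    have hstep : pvStepC instructions C (String.ofList [a, b], c) =
        C.modify (pvLookup instructions (String.ofList [a, b])) 0 (· + c) := by
      simp [pvStepC]
    rw [List.foldl_cons, hstep, ih _ (fun e he => hsh e (List.mem_cons_of_mem _ he))]
    rw [PySem.Dict.getD_modify]
    simp only [List.map_cons, List.sum_cons]
    by_cases hx : x = pvLookup instructions (String.ofList [a, b])
    · subst hx
      rw [if_pos rfl, if_pos rfl]
      ring
    · rw [if_neg hx, if_neg (fun h => hx h.symm)]
      ring

theorem pvMemKeys_foldl_stepC (instructions : List (String × String)) (L : List (String × Int))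
    (C : PySem.Dict String Int) (hsh : ∀ e ∈ L, ∃ a b, e.1 = String.ofList [a, b]) (x : String) :
    x ∈ (L.foldl (pvStepC instructions) C).keys ↔
      x ∈ C.keys ∨ ∃ e ∈ L, x = pvLookup instructions e.1 := by
  induction L generalizing C with
  | nil => simp
  | cons e L ih =>
    obtain ⟨a, b, hab⟩ := hsh e (List.mem_cons_self ..)
    obtain ⟨k, c⟩ := e
    simp only at hab
    subst hab
    have hstep : pvStepC instructions C (String.ofList [a, b], c) =
        C.modify (pvLookup instructions (String.ofList [a, b])) 0 (· + c) := by
      simp [pvStepC]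
    rw [List.foldl_cons, hstep, ih _ (fun e he => hsh e (List.mem_cons_of_mem _ he))]
    rw [PySem.Dict.keys_modify, PySem.Dict.mem_keys_insert]
    constructor
    · rintro ((h | h) | h)
      · exact Or.inr ⟨_, List.mem_cons_self .., h⟩
      · exact Or.inl h
      · obtain ⟨e, he, hx⟩ := h
        exact Or.inr ⟨e, List.mem_cons_of_mem _ he, hx⟩
    · rintro (h | ⟨e, he, hx⟩)
      · exact Or.inl (Or.inr h)
      · rcases List.mem_cons.mp he with h | h
        · subst h; exact Or.inl (Or.inl hx)
        · exact Or.inr ⟨e, h, hx⟩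

theorem pvNodup_modify (d : PySem.Dict String Int) (k : String) (f : Int → Int)
    (h : d.keys.Nodup) : (d.modify k 0 f).keys.Nodup := by
  rw [PySem.Dict.keys_modify]
  exact (PySem.Dict.nodup_keys_insert _ _ _ h)

theorem pvNodup_foldl_stepC (instructions : List (String × String)) (L : List (String × Int))
    (C : PySem.Dict String Int) (hsh : ∀ e ∈ L, ∃ a b, e.1 = String.ofList [a, b])
    (h : C.keys.Nodup) : (L.foldl (pvStepC instructions) C).keys.Nodup := by
  induction L generalizing C with
  | nil => exact h
  | cons e L ih =>
    obtain ⟨a, b, hab⟩ := hsh e (List.mem_cons_self ..)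
    obtain ⟨k, c⟩ := e
    simp only at hab
    subst hab
    have hstep : pvStepC instructions C (String.ofList [a, b], c) =
        C.modify (pvLookup instructions (String.ofList [a, b])) 0 (· + c) := by
      simp [pvStepC]
    rw [List.foldl_cons, hstep]
    exact ih _ (fun e he => hsh e (List.mem_cons_of_mem _ he)) (pvNodup_modify _ _ _ h)

-- per-entry contribution of A's inner loop to the pair counter at key q
def pvDelta (instructions : List (String × String)) (e : String × Int) (q : String) : Int :=
  (if pvChA instructions e.1 = q then e.2 else 0) +
    (if pvChB instructions e.1 = q then e.2 else 0) - (if e.1 = q then e.2 else 0)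

theorem pvStepP_eq (instructions : List (String × String)) (P : PySem.Dict String Int)
    (a b : Char) (c : Int) :
    pvStepP instructions P (String.ofList [a, b], c) =
      (((P.modify (String.ofList [a, b]) 0 (· - c)).modify
          (pvChA instructions (String.ofList [a, b])) 0 (· + c)).modify
          (pvChB instructions (String.ofList [a, b])) 0 (· + c)) := by
  simp [pvStepP, pvChA, pvChB]

theorem pvGetD_modify_add (d : PySem.Dict String Int) (k q : String) (c : Int) :
    (d.modify k 0 (· + c)).getD q 0 = d.getD q 0 + (if k = q then c else 0) := by
  rw [PySem.Dict.getD_modify]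
  by_cases h : q = k
  · subst h; simp
  · rw [if_neg h, if_neg (fun hh => h hh.symm)]; simp

theorem pvGetD_modify_sub (d : PySem.Dict String Int) (k q : String) (c : Int) :
    (d.modify k 0 (· - c)).getD q 0 = d.getD q 0 - (if k = q then c else 0) := by
  rw [PySem.Dict.getD_modify]
  by_cases h : q = k
  · subst h; simp
  · rw [if_neg h, if_neg (fun hh => h hh.symm)]; simp

theorem pvStepP_getD (instructions : List (String × String)) (P : PySem.Dict String Int)
    (a b : Char) (c : Int) (q : String) :
    (pvStepP instructions P (String.ofList [a, b], c)).getD q 0 =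
      P.getD q 0 + pvDelta instructions (String.ofList [a, b], c) q := by
  rw [pvStepP_eq]
  rw [pvGetD_modify_add, pvGetD_modify_add, pvGetD_modify_sub]
  unfold pvDelta
  simp only []
  ring

theorem pvGetD_foldl_stepP (instructions : List (String × String)) (L : List (String × Int))
    (P : PySem.Dict String Int) (hsh : ∀ e ∈ L, ∃ a b, e.1 = String.ofList [a, b]) (q : String) :
    (L.foldl (pvStepP instructions) P).getD q 0 =
      P.getD q 0 + (L.map (fun e => pvDelta instructions e q)).sum := by
  induction L generalizing P with
  | nil => simp
  | cons e L ih =>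
    obtain ⟨a, b, hab⟩ := hsh e (List.mem_cons_self ..)
    obtain ⟨k, c⟩ := e
    simp only at hab
    subst hab
    rw [List.foldl_cons, ih _ (fun e he => hsh e (List.mem_cons_of_mem _ he)), pvStepP_getD]
    simp only [List.map_cons, List.sum_cons]
    ring

theorem pvMemKeys_foldl_stepP (instructions : List (String × String)) (L : List (String × Int))
    (P : PySem.Dict String Int) (hsh : ∀ e ∈ L, ∃ a b, e.1 = String.ofList [a, b]) (q : String) :
    q ∈ (L.foldl (pvStepP instructions) P).keys ↔
      q ∈ P.keys ∨ ∃ e ∈ L, q = e.1 ∨ q = pvChA instructions e.1 ∨ q = pvChB instructions e.1 := by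
  induction L generalizing P with
  | nil => simp
  | cons e L ih =>
    obtain ⟨a, b, hab⟩ := hsh e (List.mem_cons_self ..)
    obtain ⟨k, c⟩ := e
    simp only at hab
    subst hab
    rw [List.foldl_cons, pvStepP_eq, ih _ (fun e he => hsh e (List.mem_cons_of_mem _ he))]
    rw [PySem.Dict.keys_modify, PySem.Dict.mem_keys_insert,
      PySem.Dict.keys_modify, PySem.Dict.mem_keys_insert,
      PySem.Dict.keys_modify, PySem.Dict.mem_keys_insert]
    constructor
    · rintro ((h | h | h | h) | h)
      · exact Or.inr ⟨_, List.mem_cons_self .., Or.inr (Or.inr h)⟩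
      · exact Or.inr ⟨_, List.mem_cons_self .., Or.inr (Or.inl h)⟩
      · exact Or.inr ⟨_, List.mem_cons_self .., Or.inl h⟩
      · exact Or.inl h
      · obtain ⟨e, he, hx⟩ := h
        exact Or.inr ⟨e, List.mem_cons_of_mem _ he, hx⟩
    · rintro (h | ⟨e, he, hx⟩)
      · exact Or.inl (Or.inr (Or.inr (Or.inr h)))
      · rcases List.mem_cons.mp he with h | h
        · subst h
          rcases hx with h | h | h
          · exact Or.inl (Or.inr (Or.inr (Or.inl h)))
          · exact Or.inl (Or.inr (Or.inl h))
          · exact Or.inl (Or.inl h)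
        · exact Or.inr ⟨e, h, hx⟩

theorem pvNodup_foldl_stepP (instructions : List (String × String)) (L : List (String × Int))
    (P : PySem.Dict String Int) (hsh : ∀ e ∈ L, ∃ a b, e.1 = String.ofList [a, b])
    (h : P.keys.Nodup) : (L.foldl (pvStepP instructions) P).keys.Nodup := by
  induction L generalizing P with
  | nil => exact h
  | cons e L ih =>
    obtain ⟨a, b, hab⟩ := hsh e (List.mem_cons_self ..)
    obtain ⟨k, c⟩ := e
    simp only at hab
    subst hab
    rw [List.foldl_cons, pvStepP_eq]
    exact ih _ (fun e he => hsh e (List.mem_cons_of_mem _ he))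
      (pvNodup_modify _ _ _ (pvNodup_modify _ _ _ (pvNodup_modify _ _ _ h)))

theorem pvOfList_inj {l1 l2 : List Char} (h : String.ofList l1 = String.ofList l2) :
    l1 = l2 := by
  simpa using congrArg String.toList h

theorem pvFc_spec (instructions : List (String × String)) (A : List Char)
    (hG : pvGood instructions A) {a b : Char} (ha : a ∈ A) (hb : b ∈ A) :
    pvLookup instructions (String.ofList [a, b]) = pvSg (pvFc instructions (a, b)) ∧
      pvFc instructions (a, b) ∈ A := by
  obtain ⟨c, hc, hget⟩ := hG a ha b hb
  have hl : pvLookup instructions (String.ofList [a, b]) = String.ofList [c] := by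
    simp [pvLookup, hget]
  have hfc : pvFc instructions (a, b) = c := by simp [pvFc, pvKeyStr, hl]
  rw [hfc, hl]
  exact ⟨rfl, hc⟩

theorem pvExpandR_cons (instructions : List (String × String)) (b : Char) (t : List Char) :
    ∃ r, pvExpandR instructions (b :: t) = b :: r := by
  cases t with
  | nil => exact ⟨[], rfl⟩
  | cons c t => exact ⟨_, rfl⟩

theorem pvMpairs_cons2 (x y : Char) (l : List Char) :
    pvMpairs (x :: y :: l) = pvKeyStr (x, y) :: pvMpairs (y :: l) := by
  simp [pvMpairs]

theorem pvMpairs_expandR (instructions : List (String × String)) (A : List Char)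
    (hG : pvGood instructions A) :
    ∀ s : List Char, (∀ x ∈ s, x ∈ A) →
      pvMpairs (pvExpandR instructions s) =
        (s.zip s.tail).flatMap (fun p =>
          [pvKeyStr (p.1, pvFc instructions p), pvKeyStr (pvFc instructions p, p.2)])
  | [], _ => by simp [pvExpandR, pvMpairs]
  | [a], _ => by simp [pvExpandR, pvMpairs]
  | a :: b :: t, hs => by
    have ha : a ∈ A := hs a (List.mem_cons_self ..)
    have hb : b ∈ A := hs b (List.mem_cons_of_mem _ (List.mem_cons_self ..))
    obtain ⟨hl, _⟩ := pvFc_spec instructions A hG ha hb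
    have ih := pvMpairs_expandR instructions A hG (b :: t)
      (fun x hx => hs x (List.mem_cons_of_mem _ hx))
    obtain ⟨r, hr⟩ := pvExpandR_cons instructions b t
    rw [pvExpandR, hl]
    have hsg : (pvSg (pvFc instructions (a, b))).toList = [pvFc instructions (a, b)] := by
      simp [pvSg]
    rw [hsg, hr]
    show pvMpairs (a :: pvFc instructions (a, b) :: b :: r) = _
    rw [pvMpairs_cons2, pvMpairs_cons2, ← hr, ih]
    simp [pvKeyStr]

theorem pvCount_expandR (instructions : List (String × String)) (A : List Char)
    (hG : pvGood instructions A) :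
    ∀ s : List Char, (∀ x ∈ s, x ∈ A) → ∀ x : Char,
      (pvExpandR instructions s).count x =
        s.count x + ((s.zip s.tail).map (pvFc instructions)).count x
  | [], _ => by simp [pvExpandR]
  | [a], _ => by simp [pvExpandR]
  | a :: b :: t, hs => by
    intro x
    have ha : a ∈ A := hs a (List.mem_cons_self ..)
    have hb : b ∈ A := hs b (List.mem_cons_of_mem _ (List.mem_cons_self ..))
    obtain ⟨hl, _⟩ := pvFc_spec instructions A hG ha hb
    have ih := pvCount_expandR instructions A hG (b :: t)
      (fun y hy => hs y (List.mem_cons_of_mem _ hy)) x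
    rw [pvExpandR, hl]
    have hsg : (pvSg (pvFc instructions (a, b))).toList = [pvFc instructions (a, b)] := by
      simp [pvSg]
    rw [hsg]
    show (a :: (pvFc instructions (a, b) :: pvExpandR instructions (b :: t))).count x = _
    simp only [List.count_cons, List.zip_cons_cons, List.map_cons, List.tail_cons] at ih ⊢
    rw [ih]
    omega

theorem pvSum_single (g : String → Int) (m : String) :
    ∀ K : List String, K.Nodup → m ∈ K →
      (K.map (fun k => if k = m then g k else 0)).sum = g m := by
  intro K
  induction K with
  | nil => intro _ hm; cases hm
  | cons k K ih =>
    intro hK hm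
    by_cases h : k = m
    · simp only [List.map_cons, List.sum_cons, if_pos h]
      have hz : (K.map (fun k' => if k' = m then g k' else 0)).sum = 0 := by
        apply List.sum_eq_zero
        intro x hx
        obtain ⟨k', hk', hval⟩ := List.mem_map.mp hx
        rw [if_neg (fun he : k' = m => (List.nodup_cons.mp hK).1 ((he.trans h.symm) ▸ hk'))] at hval
        exact hval.symm
      rw [hz, h]; ring
    · have hm' : m ∈ K := by
        rcases List.mem_cons.mp hm with h' | h'
        · exact absurd h'.symm h
        · exact h'
      simp only [List.map_cons, List.sum_cons, if_neg h]
      rw [ih (List.nodup_cons.mp hK).2 hm']; ring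

theorem pvSum_weighted (g : String → Int) (K : List String) (hK : K.Nodup) :
    ∀ M : List String, (∀ x ∈ M, x ∈ K) →
      (K.map (fun k => (M.count k : Int) * g k)).sum = (M.map g).sum := by
  intro M
  induction M with
  | nil => intro _; simp
  | cons m M ih =>
    intro hM
    have h1 : ∀ k ∈ K, ((m :: M).count k : Int) * g k =
        (M.count k : Int) * g k + (if k = m then g k else 0) := by
      intro k _
      rw [List.count_cons]
      by_cases h : m = k
      · subst h; simp; ring
      · simp only [beq_iff_eq, if_neg h, if_neg (fun he : k = m => h he.symm)]
        push_cast; ring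
    rw [List.map_congr_left h1, PySem.List.sum_map_add_int]
    rw [ih (fun x hx => hM x (List.mem_cons_of_mem _ hx)),
      pvSum_single g m K hK (hM m (List.mem_cons_self ..))]
    rw [List.map_cons, List.sum_cons]
    ring

theorem pvSum_ite_count (q : String) : ∀ M : List String,
    (M.map (fun m => if m = q then (1 : Int) else 0)).sum = (M.count q : Int) := by
  intro M
  induction M with
  | nil => simp
  | cons m M ih =>
    simp only [List.map_cons, List.sum_cons, List.count_cons, ih]
    by_cases h : m = q
    · simp [h]; omega
    · simp [h]

theorem pvCount_flatMap_two (l : List (Char × Char)) (u v : Char × Char → String) (q : String) :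
    ((l.flatMap (fun p => [u p, v p])).count q : Int) =
      (l.map (fun p => (if u p = q then (1 : Int) else 0) + (if v p = q then 1 else 0))).sum := by
  induction l with
  | nil => simp
  | cons p l ih =>
    rw [List.flatMap_cons, List.count_append]
    push_cast
    rw [ih]
    simp only [List.map_cons, List.sum_cons, List.count_cons, List.count_nil]
    by_cases h1 : u p = q <;> by_cases h2 : v p = q <;> simp [h1, h2]

theorem pvSg_inj : Function.Injective pvSg := by
  intro a b h
  simpa using pvOfList_inj h

theorem pvKeyStr_inj {p p' : Char × Char} (h : pvKeyStr p = pvKeyStr p') : p = p' := by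
  have := pvOfList_inj h
  obtain ⟨a, b⟩ := p
  obtain ⟨a', b'⟩ := p'
  simp only [List.cons.injEq] at this
  simp [this.1, this.2.1]

theorem pvChA_keyStr (instructions : List (String × String)) (A : List Char)
    (hG : pvGood instructions A) {a b : Char} (ha : a ∈ A) (hb : b ∈ A) :
    pvChA instructions (String.ofList [a, b]) =
      String.ofList [a, pvFc instructions (a, b)] := by
  obtain ⟨hl, _⟩ := pvFc_spec instructions A hG ha hb
  simp [pvChA, hl, pvSg]

theorem pvChB_keyStr (instructions : List (String × String)) (A : List Char)
    (hG : pvGood instructions A) {a b : Char} (ha : a ∈ A) (hb : b ∈ A) :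
    pvChB instructions (String.ofList [a, b]) =
      String.ofList [pvFc instructions (a, b), b] := by
  obtain ⟨hl, _⟩ := pvFc_spec instructions A hG ha hb
  simp [pvChB, hl, pvSg]

theorem pvSum_map_sub (l : List (Char × Char)) (f g : Char × Char → Int) :
    (l.map (fun p => f p - g p)).sum = (l.map f).sum - (l.map g).sum := by
  induction l with
  | nil => simp
  | cons p l ih => simp only [List.map_cons, List.sum_cons, ih]; ring

theorem pvMem_expandR (instructions : List (String × String)) (A : List Char)
    (hG : pvGood instructions A) (s : List Char) (hs : ∀ x ∈ s, x ∈ A) (x : Char) :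
    x ∈ pvExpandR instructions s ↔
      x ∈ s ∨ ∃ p ∈ s.zip s.tail, pvFc instructions p = x := by
  have hcnt := pvCount_expandR instructions A hG s hs x
  constructor
  · intro hx
    have : 0 < (pvExpandR instructions s).count x := List.count_pos_iff.mpr hx
    rw [hcnt] at this
    by_cases h : x ∈ s
    · exact Or.inl h
    · have h0 : s.count x = 0 := List.count_eq_zero.mpr h
      rw [h0] at this
      have : x ∈ (s.zip s.tail).map (pvFc instructions) := List.count_pos_iff.mp (by omega)
      obtain ⟨p, hp, hpx⟩ := List.mem_map.mp this
      exact Or.inr ⟨p, hp, hpx⟩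
  · intro hx
    apply List.count_pos_iff.mp
    rw [hcnt]
    rcases hx with h | ⟨p, hp, hpx⟩
    · have := List.count_pos_iff.mpr h
      omega
    · have : x ∈ (s.zip s.tail).map (pvFc instructions) := List.mem_map.mpr ⟨p, hp, hpx⟩
      have := List.count_pos_iff.mpr this
      omega

theorem pvCount_sg_expandR (instructions : List (String × String)) (A : List Char)
    (hG : pvGood instructions A) (s : List Char) (hs : ∀ x ∈ s, x ∈ A) (y : String) :
    ((pvExpandR instructions s).map pvSg).count y =
      (s.map pvSg).count y + (((s.zip s.tail).map (pvFc instructions)).map pvSg).count y := by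
  by_cases hy : ∃ c, y = pvSg c
  · obtain ⟨c, rfl⟩ := hy
    rw [List.count_map_of_injective _ pvSg pvSg_inj c,
      List.count_map_of_injective _ pvSg pvSg_inj c,
      List.count_map_of_injective _ pvSg pvSg_inj c]
    exact pvCount_expandR instructions A hG s hs c
  · have hz : ∀ l : List Char, (l.map pvSg).count y = 0 := by
      intro l
      apply List.count_eq_zero.mpr
      intro hmem
      obtain ⟨c, _, hc⟩ := List.mem_map.mp hmem
      exact hy ⟨c, hc.symm⟩
    rw [hz, hz, hz]

theorem pvInv_step (instructions : List (String × String)) (A s : List Char)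
    (P C : PySem.Dict String Int) (hG : pvGood instructions A)
    (hI : pvInv instructions A s P C) :
    pvInv instructions A (pvExpandR instructions s)
      (P.items.foldl (pvStepP instructions) P)
      (P.items.foldl (pvStepC instructions) C) := by
  obtain ⟨hs, hPn, hCn, hPsh, hCsh, hCmem, hP, hC, hW⟩ := hI
  have hitems : P.items = P.keys.map (fun k => (k, P.getD k 0)) :=
    PySem.Dict.items_eq_map_keys P hPn 0
  have hshape' : ∀ e ∈ P.items, ∃ a b, e.1 = String.ofList [a, b] := by
    intro e he
    obtain ⟨a, b, _, _, hk⟩ := hPsh e.1 (PySem.Dict.mem_keys_of_mem_items P he)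
    exact ⟨a, b, hk⟩
  have hMK : ∀ m ∈ pvMpairs s, m ∈ P.keys := by
    intro m hm
    by_contra hnk
    have hcon : P.contains m = false := by
      cases h : P.contains m
      · rfl
      · exact absurd ((PySem.Dict.contains_iff_mem_keys P m).mp h) hnk
    have h0 : P.getD m 0 = 0 := PySem.Dict.getD_of_not_contains P 0 hcon
    have h1 := hP m
    rw [h0] at h1
    have h2 := List.count_pos_iff.mpr hm
    omega
  have hss' : ∀ c ∈ s, c ∈ pvExpandR instructions s := fun c hc =>
    (pvMem_expandR instructions A hG s hs c).mpr (Or.inl hc)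
  have hs' : ∀ x ∈ pvExpandR instructions s, x ∈ A := by
    intro x hx
    rcases (pvMem_expandR instructions A hG s hs x).mp hx with h | ⟨p, hp, hpx⟩
    · exact hs x h
    · obtain ⟨h1, h2⟩ := List.of_mem_zip hp
      obtain ⟨_, hfc⟩ :=
        pvFc_spec instructions A hG (hs _ h1) (hs _ (List.mem_of_mem_tail h2))
      rw [← hpx]
      exact hfc
  refine ⟨hs', ?_, ?_, ?_, ?_, ?_, ?_, ?_, ?_⟩
  · exact pvNodup_foldl_stepP _ _ _ hshape' hPn
  · exact pvNodup_foldl_stepC _ _ _ hshape' hCn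
  · -- shape of the new pair keys
    intro k hk
    rcases (pvMemKeys_foldl_stepP _ _ _ hshape' k).mp hk with h | ⟨e, he, hcase⟩
    · exact hPsh k h
    · obtain ⟨a, b, ha, hb, he1⟩ := hPsh e.1 (PySem.Dict.mem_keys_of_mem_items P he)
      obtain ⟨_, hfcA⟩ := pvFc_spec instructions A hG ha hb
      rcases hcase with rfl | rfl | rfl
      · exact ⟨a, b, ha, hb, he1⟩
      · exact ⟨a, pvFc instructions (a, b), ha, hfcA,
          by rw [he1, pvChA_keyStr instructions A hG ha hb]⟩
      · exact ⟨pvFc instructions (a, b), b, hfcA, hb,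
          by rw [he1, pvChB_keyStr instructions A hG ha hb]⟩
  · -- shape of the new char keys
    intro k hk
    rcases (pvMemKeys_foldl_stepC _ _ _ hshape' k).mp hk with h | ⟨e, he, hke⟩
    · obtain ⟨c, hc, hcs⟩ := hCsh k h
      exact ⟨c, hss' c hc, hcs⟩
    · have heK := PySem.Dict.mem_keys_of_mem_items P he
      obtain ⟨a, b, ha, hb, he1⟩ := hPsh e.1 heK
      obtain ⟨hl, _⟩ := pvFc_spec instructions A hG ha hb
      by_cases hpos : 0 < (pvMpairs s).count e.1
      · have hmemM : e.1 ∈ pvMpairs s := List.count_pos_iff.mp hpos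
        obtain ⟨p, hp, hpk⟩ := List.mem_map.mp hmemM
        have hpab : p = (a, b) := pvKeyStr_inj (by rw [hpk, he1]; rfl)
        refine ⟨pvFc instructions (a, b), ?_, ?_⟩
        · exact (pvMem_expandR instructions A hG s hs _).mpr
            (Or.inr ⟨p, hp, by rw [hpab]⟩)
        · rw [hke, he1, hl]
          rfl
      · rcases hW e.1 heK with h | ⟨hCk, _, _⟩
        · exact absurd h hpos
        · obtain ⟨c, hc, hcs⟩ := hCsh _ hCk
          exact ⟨c, hss' c hc, by rw [hke, hcs]⟩
  · -- every char of the new string is a key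
    intro c hc
    rcases (pvMem_expandR instructions A hG s hs c).mp hc with h | ⟨p, hp, hpc⟩
    · exact (pvMemKeys_foldl_stepC _ _ _ hshape' _).mpr (Or.inl (hCmem c h))
    · have hkM : pvKeyStr p ∈ pvMpairs s := List.mem_map_of_mem hp
      have he : (pvKeyStr p, P.getD (pvKeyStr p) 0) ∈ P.items := by
        rw [hitems]
        exact List.mem_map_of_mem (hMK _ hkM)
      apply (pvMemKeys_foldl_stepC _ _ _ hshape' _).mpr
      refine Or.inr ⟨_, he, ?_⟩
      obtain ⟨h1, h2⟩ := List.of_mem_zip hp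
      obtain ⟨hl, _⟩ :=
        pvFc_spec instructions A hG (hs _ h1) (hs _ (List.mem_of_mem_tail h2))
      rw [← hpc]
      exact hl.symm
  · -- the pair counter counts the pairs of the new string
    intro q
    rw [pvGetD_foldl_stepP _ _ _ hshape' q, hP q, hitems, List.map_map]
    have hdelta : ∀ k ∈ P.keys,
        ((fun e => pvDelta instructions e q) ∘ fun k => (k, P.getD k 0)) k =
          ((pvMpairs s).count k : Int) *
            ((if pvChA instructions k = q then (1 : Int) else 0) +
              (if pvChB instructions k = q then 1 else 0) - (if k = q then 1 else 0)) := by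
      intro k _
      show pvDelta instructions (k, P.getD k 0) q = _
      unfold pvDelta
      simp only []
      rw [hP k]
      split_ifs <;> ring
    rw [List.map_congr_left hdelta, pvSum_weighted _ P.keys hPn (pvMpairs s) hMK]
    rw [show pvMpairs s = (s.zip s.tail).map pvKeyStr from rfl, List.map_map]
    have hpoint : ∀ p ∈ s.zip s.tail,
        ((fun k =>
            (if pvChA instructions k = q then (1 : Int) else 0) +
              (if pvChB instructions k = q then 1 else 0) - (if k = q then 1 else 0)) ∘
          pvKeyStr) p =
          ((if pvKeyStr (p.1, pvFc instructions p) = q then (1 : Int) else 0) +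
              (if pvKeyStr (pvFc instructions p, p.2) = q then 1 else 0)) -
            (if pvKeyStr p = q then 1 else 0) := by
      intro p hp
      obtain ⟨h1, h2⟩ := List.of_mem_zip hp
      have ha := hs _ h1
      have hb := hs _ (List.mem_of_mem_tail h2)
      show (if pvChA instructions (pvKeyStr p) = q then (1 : Int) else 0) + _ - _ = _
      rw [show pvKeyStr p = String.ofList [p.1, p.2] from rfl,
        pvChA_keyStr instructions A hG ha hb, pvChB_keyStr instructions A hG ha hb]
      rfl
    rw [List.map_congr_left hpoint, pvSum_map_sub, PySem.List.sum_map_add_int]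
    have hsum3 : ((s.zip s.tail).map (fun p => if pvKeyStr p = q then (1 : Int) else 0)).sum =
        ((pvMpairs s).count q : Int) := by
      rw [show pvMpairs s = (s.zip s.tail).map pvKeyStr from rfl]
      rw [← pvSum_ite_count q ((s.zip s.tail).map pvKeyStr), List.map_map]
      rfl
    have hsum12 :
        ((s.zip s.tail).map (fun p => if pvKeyStr (p.1, pvFc instructions p) = q then (1 : Int) else 0)).sum +
          ((s.zip s.tail).map (fun p => if pvKeyStr (pvFc instructions p, p.2) = q then (1 : Int) else 0)).sum =
          (((pvMpairs (pvExpandR instructions s)).count q : Int)) := by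
      rw [pvMpairs_expandR instructions A hG s hs,
        pvCount_flatMap_two (s.zip s.tail)
          (fun p => pvKeyStr (p.1, pvFc instructions p))
          (fun p => pvKeyStr (pvFc instructions p, p.2)) q,
        PySem.List.sum_map_add_int]
    rw [hsum3, hsum12]
    rw [show List.map pvKeyStr (s.zip s.tail) = pvMpairs s from rfl]
    ring
  · -- the char counter counts the chars of the new string
    intro y
    rw [pvGetD_foldl_stepC _ _ _ hshape' y, hC y,
      pvCount_sg_expandR instructions A hG s hs y, hitems, List.map_map]
    have hpoint : ∀ k ∈ P.keys,
        ((fun e => if pvLookup instructions e.1 = y then e.2 else 0) ∘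
          fun k => (k, P.getD k 0)) k =
          ((pvMpairs s).count k : Int) *
            (if pvLookup instructions k = y then (1 : Int) else 0) := by
      intro k _
      show (if pvLookup instructions k = y then P.getD k 0 else 0) = _
      rw [hP k]
      split_ifs <;> ring
    rw [List.map_congr_left hpoint, pvSum_weighted _ P.keys hPn (pvMpairs s) hMK]
    rw [show pvMpairs s = (s.zip s.tail).map pvKeyStr from rfl, List.map_map]
    have hpoint2 : ∀ p ∈ s.zip s.tail,
        ((fun k => if pvLookup instructions k = y then (1 : Int) else 0) ∘ pvKeyStr) p =
          (fun m => if m = y then (1 : Int) else 0) (pvSg (pvFc instructions p)) := by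
      intro p hp
      obtain ⟨h1, h2⟩ := List.of_mem_zip hp
      obtain ⟨hl, _⟩ :=
        pvFc_spec instructions A hG (hs _ h1) (hs _ (List.mem_of_mem_tail h2))
      show (if pvLookup instructions (pvKeyStr p) = y then (1 : Int) else 0) = _
      rw [show pvKeyStr p = String.ofList [p.1, p.2] from rfl, hl]
    rw [List.map_congr_left hpoint2]
    have hsum : ((s.zip s.tail).map
          (fun p => (fun m => if m = y then (1 : Int) else 0) (pvSg (pvFc instructions p)))).sum =
        (((((s.zip s.tail).map (pvFc instructions)).map pvSg).count y : Int)) := by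
      rw [← pvSum_ite_count y (((s.zip s.tail).map (pvFc instructions)).map pvSg),
        List.map_map, List.map_map]
      rfl
    rw [hsum]
    push_cast
    ring
  · -- the W invariant: zero-count keys have materialized children
    intro k hk
    by_cases hkP : k ∈ P.keys
    · have he : (k, P.getD k 0) ∈ P.items := by
        rw [hitems]
        exact List.mem_map_of_mem hkP
      refine Or.inr ⟨?_, ?_, ?_⟩
      · exact (pvMemKeys_foldl_stepC _ _ _ hshape' _).mpr (Or.inr ⟨_, he, rfl⟩)
      · exact (pvMemKeys_foldl_stepP _ _ _ hshape' _).mpr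
          (Or.inr ⟨_, he, Or.inr (Or.inl rfl)⟩)
      · exact (pvMemKeys_foldl_stepP _ _ _ hshape' _).mpr
          (Or.inr ⟨_, he, Or.inr (Or.inr rfl)⟩)
    · rcases (pvMemKeys_foldl_stepP _ _ _ hshape' k).mp hk with h | ⟨e, he, hcase⟩
      · exact absurd h hkP
      · have heK := PySem.Dict.mem_keys_of_mem_items P he
        obtain ⟨a, b, ha, hb, he1⟩ := hPsh e.1 heK
        by_cases hpos : 0 < (pvMpairs s).count e.1
        · left
          have hmemM : e.1 ∈ pvMpairs s := List.count_pos_iff.mp hpos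
          obtain ⟨p, hp, hpk⟩ := List.mem_map.mp hmemM
          have hpab : p = (a, b) := pvKeyStr_inj (by rw [hpk, he1]; rfl)
          apply List.count_pos_iff.mpr
          rw [pvMpairs_expandR instructions A hG s hs]
          refine List.mem_flatMap.mpr ⟨p, hp, ?_⟩
          rcases hcase with rfl | rfl | rfl
          · exact absurd heK hkP
          · rw [he1, pvChA_keyStr instructions A hG ha hb, hpab]
            exact List.mem_cons_self ..
          · rw [he1, pvChB_keyStr instructions A hG ha hb, hpab]
            exact List.mem_cons_of_mem _ (List.mem_cons_self ..)
        · rcases hW e.1 heK with h | ⟨_, hA, hB⟩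
          · exact absurd h hpos
          · rcases hcase with rfl | rfl | rfl
            · exact absurd heK hkP
            · exact absurd hA hkP
            · exact absurd hB hkP

theorem pvStepA_eq (instructions : List (String × String))
    (st : PySem.Dict String Int × PySem.Dict String Int) (e : String × Int) :
    pvStepA instructions st e = (pvStepP instructions st.1 e, pvStepC instructions st.2 e) := by
  obtain ⟨P, C⟩ := st
  unfold pvStepA pvStepP pvStepC
  rcases h : e.1.toList with _ | ⟨a, _ | ⟨b, _ | ⟨c, t⟩⟩⟩ <;> rfl

theorem pvFoldl_stepA (instructions : List (String × String)) (L : List (String × Int))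
    (P C : PySem.Dict String Int) :
    L.foldl (pvStepA instructions) (P, C) =
      (L.foldl (pvStepP instructions) P, L.foldl (pvStepC instructions) C) := by
  induction L generalizing P C with
  | nil => rfl
  | cons e L ih =>
    rw [List.foldl_cons, pvStepA_eq]
    exact ih _ _

theorem pvValues_update (l : List (String × String)) :
    ∀ (d : PySem.Dict String String) (v : String), v ∈ (d.update l).values →
      v ∈ d.values ∨ ∃ pr ∈ l, pr.2 = v := by
  induction l with
  | nil => intro d v h; exact Or.inl h
  | cons p l ih =>
    intro d v h
    have hup : PySem.Dict.update d (p :: l) = PySem.Dict.update (d.insert p.1 p.2) l := rfl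
    rw [hup] at h
    rcases ih _ v h with h' | ⟨pr, hpr, hv⟩
    · rcases PySem.Dict.mem_values_insert d p.1 p.2 v h' with h'' | h''
      · exact Or.inr ⟨p, List.mem_cons_self .., h''.symm⟩
      · exact Or.inl h''
    · exact Or.inr ⟨pr, List.mem_cons_of_mem _ hpr, hv⟩

theorem pvValues_ofList (l : List (String × String)) (k v : String)
    (h : (PySem.Dict.ofList l).get? k = some v) : ∃ pr ∈ l, pr.2 = v := by
  have hv : v ∈ (PySem.Dict.ofList l).values := by
    have := PySem.Dict.mem_items_of_get?_eq_some _ h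
    exact List.mem_map_of_mem this
  rcases pvValues_update l PySem.Dict.empty v hv with h' | h'
  · simp [PySem.Dict.empty, PySem.Dict.values] at h'
  · exact h'

theorem pvInv_loop (instructions : List (String × String)) (A s : List Char)
    (P C : PySem.Dict String Int) (hG : pvGood instructions A)
    (hI : pvInv instructions A s P C) (l : List Int) :
    pvInv instructions A (l.foldl (fun s _ => pvExpandR instructions s) s)
      (l.foldl (fun st _ => st.1.items.foldl (pvStepA instructions) st) (P, C)).1
      (l.foldl (fun st _ => st.1.items.foldl (pvStepA instructions) st) (P, C)).2 := by
  induction l generalizing s P C with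
  | nil => exact hI
  | cons i l ih =>
    simp only [List.foldl_cons]
    rw [pvFoldl_stepA]
    exact ih _ _ _ (pvInv_step instructions A s P C hG hI)

theorem pvInv_init (instructions : List (String × String)) (A s : List Char)
    (hs : ∀ x ∈ s, x ∈ A) :
    pvInv instructions A s
      (PySem.Dict.counter ((s.zip s.tail).map (fun p => String.ofList [p.1, p.2])))
      (PySem.Dict.counter (s.map (fun c => String.ofList [c]))) := by
  have hMp : (s.zip s.tail).map (fun p => String.ofList [p.1, p.2]) = pvMpairs s := rfl
  have hSg : s.map (fun c => String.ofList [c]) = s.map pvSg := rfl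
  rw [hMp, hSg]
  refine ⟨hs, PySem.Dict.nodup_keys_counter _, PySem.Dict.nodup_keys_counter _, ?_, ?_, ?_, ?_, ?_, ?_⟩
  · intro k hk
    rw [PySem.Dict.keys_counter, PySem.Set.mem_ofList] at hk
    obtain ⟨p, hp, hk⟩ := List.mem_map.mp hk
    obtain ⟨h1, h2⟩ := List.of_mem_zip hp
    exact ⟨p.1, p.2, hs _ h1, hs _ (List.mem_of_mem_tail h2), hk.symm⟩
  · intro k hk
    rw [PySem.Dict.keys_counter, PySem.Set.mem_ofList] at hk
    obtain ⟨c, hc, hk⟩ := List.mem_map.mp hk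
    exact ⟨c, hc, hk.symm⟩
  · intro c hc
    rw [PySem.Dict.keys_counter, PySem.Set.mem_ofList]
    exact List.mem_map.mpr ⟨c, hc, rfl⟩
  · intro q
    exact PySem.Dict.getD_counter _ q
  · intro y
    exact PySem.Dict.getD_counter _ y
  · intro k hk
    rw [PySem.Dict.keys_counter, PySem.Set.mem_ofList] at hk
    exact Or.inl (List.count_pos_iff.mpr hk)

theorem pvMaxEq (xs ys : List Int) (h : ∀ v, v ∈ xs ↔ v ∈ ys) (hx : xs ≠ []) :
    PySem.List.max? xs (fun v => v) = PySem.List.max? ys (fun v => v) := by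
  have hy : ys ≠ [] := by
    obtain ⟨v, hv⟩ := List.exists_mem_of_ne_nil xs hx
    exact List.ne_nil_of_mem ((h v).mp hv)
  cases hmax1 : PySem.List.max? xs (fun v => v) with
  | none => exact absurd ((PySem.List.max?_eq_none_iff xs _).mp hmax1) hx
  | some m1 =>
    cases hmax2 : PySem.List.max? ys (fun v => v) with
    | none => exact absurd ((PySem.List.max?_eq_none_iff ys _).mp hmax2) hy
    | some m2 =>
      have h12 : m1 ≤ m2 :=
        PySem.List.max?_isMax hmax2 m1 ((h m1).mp (PySem.List.max?_mem hmax1))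
      have h21 : m2 ≤ m1 :=
        PySem.List.max?_isMax hmax1 m2 ((h m2).mpr (PySem.List.max?_mem hmax2))
      rw [le_antisymm h12 h21]

theorem pvMinEq (xs ys : List Int) (h : ∀ v, v ∈ xs ↔ v ∈ ys) (hx : xs ≠ []) :
    PySem.List.min? xs (fun v => v) = PySem.List.min? ys (fun v => v) := by
  have hy : ys ≠ [] := by
    obtain ⟨v, hv⟩ := List.exists_mem_of_ne_nil xs hx
    exact List.ne_nil_of_mem ((h v).mp hv)
  cases hmin1 : PySem.List.min? xs (fun v => v) with
  | none => exact absurd ((PySem.List.min?_eq_none_iff xs _).mp hmin1) hx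
  | some m1 =>
    cases hmin2 : PySem.List.min? ys (fun v => v) with
    | none => exact absurd ((PySem.List.min?_eq_none_iff ys _).mp hmin2) hy
    | some m2 =>
      have h12 : m1 ≤ m2 :=
        PySem.List.min?_isMin hmin1 m2 ((h m2).mpr (PySem.List.min?_mem hmin2))
      have h21 : m2 ≤ m1 :=
        PySem.List.min?_isMin hmin2 m1 ((h m1).mp (PySem.List.min?_mem hmin1))
      rw [le_antisymm h12 h21]

theorem pvExtremaEq (xs ys : List Int) (h : ∀ v, v ∈ xs ↔ v ∈ ys) (hx : xs ≠ []) :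
    (PySem.List.max? xs (fun v => v)).getD 0 - (PySem.List.min? xs (fun v => v)).getD 0 =
      (PySem.List.max? ys (fun v => v)).getD 0 - (PySem.List.min? ys (fun v => v)).getD 0 := by
  rw [pvMaxEq xs ys h hx, pvMinEq xs ys h hx]

theorem pvFinal (C : PySem.Dict String Int) (s : List Char) (hn : C.keys.Nodup)
    (hCsh : ∀ k ∈ C.keys, ∃ c, c ∈ s ∧ k = String.ofList [c])
    (hCmem : ∀ c ∈ s, String.ofList [c] ∈ C.keys)
    (hC : ∀ y, C.getD y 0 = ((s.map pvSg).count y : Int)) (h0 : s ≠ []) :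
    (PySem.List.max? C.values (fun v => v)).getD 0
        - (PySem.List.min? C.values (fun v => v)).getD 0 =
      (PySem.List.max? (PySem.Dict.counter s).values (fun v => v)).getD 0
        - (PySem.List.min? (PySem.Dict.counter s).values (fun v => v)).getD 0 := by
  have hvalsC : C.values = C.keys.map (fun k => C.getD k 0) :=
    PySem.Dict.values_eq_map_keys C hn 0
  have hvalsS : (PySem.Dict.counter s).values =
      (PySem.Set.ofList s).map (fun c => ((s.count c : Int))) := by
    rw [PySem.Dict.values_eq_map_keys _ (PySem.Dict.nodup_keys_counter s) 0,
      PySem.Dict.keys_counter]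
    exact List.map_congr_left (fun c _ => PySem.Dict.getD_counter s c)
  have hgd : ∀ c : Char, C.getD (pvSg c) 0 = (s.count c : Int) := by
    intro c
    rw [hC (pvSg c), List.count_map_of_injective s pvSg pvSg_inj c]
  have hiff : ∀ v, v ∈ C.values ↔ v ∈ (PySem.Dict.counter s).values := by
    intro v
    rw [hvalsC, hvalsS]
    constructor
    · intro hv
      obtain ⟨k, hk, hv⟩ := List.mem_map.mp hv
      obtain ⟨c, hc, hk'⟩ := hCsh k hk
      subst hk'
      rw [show String.ofList [c] = pvSg c from rfl, hgd c] at hv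
      exact List.mem_map.mpr ⟨c, PySem.Set.mem_ofList s c |>.mpr hc, hv⟩
    · intro hv
      obtain ⟨c, hc, hv⟩ := List.mem_map.mp hv
      have hc' : c ∈ s := (PySem.Set.mem_ofList s c).mp hc
      exact List.mem_map.mpr ⟨pvSg c, hCmem c hc', by rw [hgd c]; exact hv⟩
  have hne : C.values ≠ [] := by
    obtain ⟨c, t, rfl⟩ : ∃ c t, s = c :: t := by
      cases s with
      | nil => exact absurd rfl h0
      | cons c t => exact ⟨c, t, rfl⟩
    have : C.getD (pvSg c) 0 ∈ C.values := by
      rw [hvalsC]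
      exact List.mem_map.mpr ⟨pvSg c, hCmem c (List.mem_cons_self ..), rfl⟩
    exact List.ne_nil_of_mem this
  exact pvExtremaEq _ _ hiff hne

-- ===== VERDICT (by name: the statement is the Claim_ definition above) =====
theorem pvFoldl_expandR_ne_nil (instructions : List (String × String)) (l : List Int) :
    ∀ s : List Char, s ≠ [] →
      l.foldl (fun s _ => pvExpandR instructions s) s ≠ [] := by
  induction l with
  | nil => intro s h; exact h
  | cons i l ih =>
    intro s h
    rw [List.foldl_cons]
    exact ih _ (pvExpandR_ne_nil instructions s h)

theorem polymerization_spec : Claim_equal_polymerization := by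
  intro start instructions length hDom hPre
  unfold Spec_polymerization
  obtain ⟨h0, hcase⟩ := hPre
  have hs0 : start.toList ≠ [] := by
    intro h
    exact h0 (by simpa using congrArg String.ofList h)
  simp only [polymerization, polymerization_alt]
  have hBfun : (fun (s : List Char) (_ : Int) => pvExpandB instructions s) =
      (fun s _ => pvExpandR instructions s) := by
    funext s i
    exact pvExpandB_eq_expandR instructions s
  rw [hBfun]
  have hsA : ∀ x ∈ start.toList, x ∈ pvAlpha start instructions := by
    intro x hx
    unfold pvAlpha
    rw [PySem.Set.mem_ofList]
    exact List.mem_append_left _ hx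
  have hI0 := pvInv_init instructions (pvAlpha start instructions) start.toList hsA
  rcases hcase with hlen | hone | hgood
  · -- length ≤ 0 : the loop never runs
    have hrange : PySem.List.pyRange 0 length 1 = [] := by
      simp [PySem.List.pyRange]
      omega
    rw [hrange]
    simp only [List.foldl_nil]
    exact pvFinal _ _ hI0.hCn hI0.hCsh hI0.hCmem hI0.hC hs0
  · -- a one-char start : the pair dict is empty, both loops are no-ops
    obtain ⟨c, hc⟩ := List.length_eq_one_iff.mp hone
    rw [hc]
    have hz : ([c].zip [c].tail).map (fun p => String.ofList [p.1, p.2]) = ([] : List String) := rfl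
    rw [hz]
    have hstA : ∀ l : List Int, ∀ C0 : PySem.Dict String Int,
        l.foldl (fun st _ => st.1.items.foldl (pvStepA instructions) st)
          (PySem.Dict.counter ([] : List String), C0) =
          (PySem.Dict.counter ([] : List String), C0) := by
      intro l C0
      induction l with
      | nil => rfl
      | cons i l ih =>
        rw [List.foldl_cons]
        exact ih
    have hstB : ∀ l : List Int, l.foldl (fun s _ => pvExpandR instructions s) [c] = [c] := by
      intro l
      induction l with
      | nil => rfl
      | cons i l ih =>
        rw [List.foldl_cons]
        exact ih
    rw [hstA, hstB]
    have hI1 := pvInv_init instructions (pvAlpha start instructions) [c]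
      (fun x hx => hsA x (hc ▸ hx))
    have hz1 : PySem.Dict.counter (([c].zip [c].tail).map (fun p => String.ofList [p.1, p.2])) =
        PySem.Dict.counter ([] : List String) := rfl
    rw [hz1] at hI1
    exact pvFinal _ _ hI1.hCn hI1.hCsh hI1.hCmem hI1.hC (by simp)
  · -- the instruction table is complete over the alphabet
    have hG : pvGood instructions (pvAlpha start instructions) := by
      intro a ha b hb
      have hthis := hgood a ha b hb
      cases hget : (PySem.Dict.ofList instructions).get? (String.ofList [a, b]) with
      | none => rw [hget] at hthis; simp at hthis
      | some v =>
        rw [hget] at hthis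
        simp only [Option.map_some, Option.some.injEq] at hthis
        obtain ⟨cch, hcch⟩ := List.length_eq_one_iff.mp hthis
        refine ⟨cch, ?_, ?_⟩
        · obtain ⟨pr, hpr, hpv⟩ := pvValues_ofList instructions _ v hget
          unfold pvAlpha
          rw [PySem.Set.mem_ofList]
          apply List.mem_append_right
          apply List.mem_flatMap.mpr ⟨pr, hpr, ?_⟩
          rw [hpv, hcch]
          exact List.mem_cons_self ..
        · have hvv : String.ofList v.toList = v := by simp
          rw [← hvv, hcch]
    have hloop := pvInv_loop instructions (pvAlpha start instructions) start.toList _ _ hG hI0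
      (PySem.List.pyRange 0 length 1)
    exact pvFinal _ _ hloop.hCn hloop.hCsh hloop.hCmem hloop.hC
      (pvFoldl_expandR_ne_nil instructions _ start.toList hs0)
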